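-- pv_equiv track=rewrite | github.com/trampolin/cardconjurer-automation | render_projects.py | get_bracket
-- ===== SOURCE A (Python) =====
-- def get_bracket(quantity):
--     brackets = [
--         18, 36, 55, 72, 90, 108, 126, 144, 162, 180, 198, 216, 234, 396, 504, 612
--     ]
--     for b in brackets:
--         if quantity <= b:
--             return b
--     return brackets[-1]
-- ===== SOURCE B (Python) =====
-- def get_bracket(quantity):
--     brackets = [
--         18, 36, 55, 72, 90, 108, 126, 144, 162, 180, 198, 216, 234, 396, 504, 612
--     ]
--     lo, hi = 0, len(brackets) - 1
--     while lo < hi: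
--         mid = (lo + hi) // 2
--         if brackets[mid] < quantity:
--             lo = mid + 1
--         else:
--             hi = mid
--     return brackets[lo]
-- ===== Notes on version B (the rewrite author's own statement) =====
-- stated objective: alternative
-- what changed: Replaced the sequential scan of the bracket table with an in-place lower-bound binary search (lo/hi halving loop) over the same sorted constant list.
import Mathlib
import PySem

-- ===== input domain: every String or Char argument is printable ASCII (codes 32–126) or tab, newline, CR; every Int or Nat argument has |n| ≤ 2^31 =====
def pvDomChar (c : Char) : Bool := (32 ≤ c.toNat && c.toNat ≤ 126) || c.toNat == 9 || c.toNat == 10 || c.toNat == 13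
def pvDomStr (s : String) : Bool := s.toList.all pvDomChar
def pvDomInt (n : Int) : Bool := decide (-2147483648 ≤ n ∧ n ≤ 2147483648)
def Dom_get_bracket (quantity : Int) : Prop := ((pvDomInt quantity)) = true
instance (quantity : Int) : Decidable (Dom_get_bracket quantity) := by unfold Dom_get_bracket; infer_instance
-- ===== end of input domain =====

-- B replaces the sequential table scan with a lower-bound binary search over the same sorted constant list (alternative decomposition, same result).
-- ===== PORT A =====
def getBracketLoop (quantity : Int) : List Int → Option Int
  | [] => none
  | b :: rest => if quantity ≤ b then some b else getBracketLoop quantity rest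

def get_bracket (quantity : Int) : Int :=
  let brackets : List Int := [18, 36, 55, 72, 90, 108, 126, 144, 162, 180, 198, 216, 234, 396, 504, 612]
  match getBracketLoop quantity brackets with
  | some b => b
  | none => (PySem.List.pyGet? brackets (-1)).getD 0  -- brackets[-1]; list is a nonempty literal so the lookup never misses

-- ===== PORT B =====
def bsLoop (quantity : Int) (brackets : List Int) (lo hi : Nat) : Nat :=
  if lo < hi then
    let mid := (lo + hi) / 2
    if brackets.getD mid 0 < quantity then bsLoop quantity brackets (mid + 1) hi
    else bsLoop quantity brackets lo mid
  else lo
termination_by hi - lo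

def get_bracket_alt (quantity : Int) : Int :=
  let brackets : List Int := [18, 36, 55, 72, 90, 108, 126, 144, 162, 180, 198, 216, 234, 396, 504, 612]
  brackets.getD (bsLoop quantity brackets 0 (brackets.length - 1)) 0  -- indices stay in range, so getD's default is never used

-- ===== PRECONDITION & SPEC =====
def Spec_get_bracket (quantity : Int) (out : Int) : Prop := out = get_bracket_alt quantity
instance (quantity : Int) (out : Int) : Decidable (Spec_get_bracket quantity out) := by unfold Spec_get_bracket; infer_instance

-- ===== CLAIM (what is proved, stated in full; the proofs are below) =====
def Claim_equal_get_bracket : Prop := ∀ (quantity : Int), Dom_get_bracket quantity → Spec_get_bracket quantity (get_bracket quantity)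

-- ===== LEMMAS AND PROOFS =====
theorem bs_step (q : Int) (L : List Int) (lo hi : Nat) (h : lo < hi) :
    bsLoop q L lo hi = if L.getD ((lo + hi) / 2) 0 < q then bsLoop q L ((lo + hi) / 2 + 1) hi
      else bsLoop q L lo ((lo + hi) / 2) := by rw [bsLoop]; simp [h]

theorem bs_done (q : Int) (L : List Int) (lo hi : Nat) (h : ¬ lo < hi) :
    bsLoop q L lo hi = lo := by rw [bsLoop]; simp [h]

theorem bs_at_0 (q : Int) (h : q ≤ 18) :
    bsLoop q [18, 36, 55, 72, 90, 108, 126, 144, 162, 180, 198, 216, 234, 396, 504, 612] 0 15 = 0 := by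
  rw [bs_step _ _ _ _ (by norm_num)]
  norm_num
  rw [if_neg (show ¬ (144 : Int) < q by omega)]
  rw [bs_step _ _ _ _ (by norm_num)]
  norm_num
  rw [if_neg (show ¬ (72 : Int) < q by omega)]
  rw [bs_step _ _ _ _ (by norm_num)]
  norm_num
  rw [if_neg (show ¬ (36 : Int) < q by omega)]
  rw [bs_step _ _ _ _ (by norm_num)]
  norm_num
  rw [if_neg (show ¬ (18 : Int) < q by omega)]
  rw [bs_done _ _ _ _ (by norm_num)]

theorem bs_at_1 (q : Int) (h1 : 18 < q) (h2 : q ≤ 36) :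
    bsLoop q [18, 36, 55, 72, 90, 108, 126, 144, 162, 180, 198, 216, 234, 396, 504, 612] 0 15 = 1 := by
  rw [bs_step _ _ _ _ (by norm_num)]
  norm_num
  rw [if_neg (show ¬ (144 : Int) < q by omega)]
  rw [bs_step _ _ _ _ (by norm_num)]
  norm_num
  rw [if_neg (show ¬ (72 : Int) < q by omega)]
  rw [bs_step _ _ _ _ (by norm_num)]
  norm_num
  rw [if_neg (show ¬ (36 : Int) < q by omega)]
  rw [bs_step _ _ _ _ (by norm_num)]
  norm_num
  rw [if_pos (show (18 : Int) < q by omega)]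
  rw [bs_done _ _ _ _ (by norm_num)]

theorem bs_at_2 (q : Int) (h1 : 36 < q) (h2 : q ≤ 55) :
    bsLoop q [18, 36, 55, 72, 90, 108, 126, 144, 162, 180, 198, 216, 234, 396, 504, 612] 0 15 = 2 := by
  rw [bs_step _ _ _ _ (by norm_num)]
  norm_num
  rw [if_neg (show ¬ (144 : Int) < q by omega)]
  rw [bs_step _ _ _ _ (by norm_num)]
  norm_num
  rw [if_neg (show ¬ (72 : Int) < q by omega)]
  rw [bs_step _ _ _ _ (by norm_num)]
  norm_num
  rw [if_pos (show (36 : Int) < q by omega)]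
  rw [bs_step _ _ _ _ (by norm_num)]
  norm_num
  rw [if_neg (show ¬ (55 : Int) < q by omega)]
  rw [bs_done _ _ _ _ (by norm_num)]

theorem bs_at_3 (q : Int) (h1 : 55 < q) (h2 : q ≤ 72) :
    bsLoop q [18, 36, 55, 72, 90, 108, 126, 144, 162, 180, 198, 216, 234, 396, 504, 612] 0 15 = 3 := by
  rw [bs_step _ _ _ _ (by norm_num)]
  norm_num
  rw [if_neg (show ¬ (144 : Int) < q by omega)]
  rw [bs_step _ _ _ _ (by norm_num)]
  norm_num
  rw [if_neg (show ¬ (72 : Int) < q by omega)]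
  rw [bs_step _ _ _ _ (by norm_num)]
  norm_num
  rw [if_pos (show (36 : Int) < q by omega)]
  rw [bs_step _ _ _ _ (by norm_num)]
  norm_num
  rw [if_pos (show (55 : Int) < q by omega)]
  rw [bs_done _ _ _ _ (by norm_num)]

theorem bs_at_4 (q : Int) (h1 : 72 < q) (h2 : q ≤ 90) :
    bsLoop q [18, 36, 55, 72, 90, 108, 126, 144, 162, 180, 198, 216, 234, 396, 504, 612] 0 15 = 4 := by
  rw [bs_step _ _ _ _ (by norm_num)]
  norm_num
  rw [if_neg (show ¬ (144 : Int) < q by omega)]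
  rw [bs_step _ _ _ _ (by norm_num)]
  norm_num
  rw [if_pos (show (72 : Int) < q by omega)]
  rw [bs_step _ _ _ _ (by norm_num)]
  norm_num
  rw [if_neg (show ¬ (108 : Int) < q by omega)]
  rw [bs_step _ _ _ _ (by norm_num)]
  norm_num
  rw [if_neg (show ¬ (90 : Int) < q by omega)]
  rw [bs_done _ _ _ _ (by norm_num)]

theorem bs_at_5 (q : Int) (h1 : 90 < q) (h2 : q ≤ 108) :
    bsLoop q [18, 36, 55, 72, 90, 108, 126, 144, 162, 180, 198, 216, 234, 396, 504, 612] 0 15 = 5 := by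
  rw [bs_step _ _ _ _ (by norm_num)]
  norm_num
  rw [if_neg (show ¬ (144 : Int) < q by omega)]
  rw [bs_step _ _ _ _ (by norm_num)]
  norm_num
  rw [if_pos (show (72 : Int) < q by omega)]
  rw [bs_step _ _ _ _ (by norm_num)]
  norm_num
  rw [if_neg (show ¬ (108 : Int) < q by omega)]
  rw [bs_step _ _ _ _ (by norm_num)]
  norm_num
  rw [if_pos (show (90 : Int) < q by omega)]
  rw [bs_done _ _ _ _ (by norm_num)]

theorem bs_at_6 (q : Int) (h1 : 108 < q) (h2 : q ≤ 126) :
    bsLoop q [18, 36, 55, 72, 90, 108, 126, 144, 162, 180, 198, 216, 234, 396, 504, 612] 0 15 = 6 := by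
  rw [bs_step _ _ _ _ (by norm_num)]
  norm_num
  rw [if_neg (show ¬ (144 : Int) < q by omega)]
  rw [bs_step _ _ _ _ (by norm_num)]
  norm_num
  rw [if_pos (show (72 : Int) < q by omega)]
  rw [bs_step _ _ _ _ (by norm_num)]
  norm_num
  rw [if_pos (show (108 : Int) < q by omega)]
  rw [bs_step _ _ _ _ (by norm_num)]
  norm_num
  rw [if_neg (show ¬ (126 : Int) < q by omega)]
  rw [bs_done _ _ _ _ (by norm_num)]

theorem bs_at_7 (q : Int) (h1 : 126 < q) (h2 : q ≤ 144) :
    bsLoop q [18, 36, 55, 72, 90, 108, 126, 144, 162, 180, 198, 216, 234, 396, 504, 612] 0 15 = 7 := by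
  rw [bs_step _ _ _ _ (by norm_num)]
  norm_num
  rw [if_neg (show ¬ (144 : Int) < q by omega)]
  rw [bs_step _ _ _ _ (by norm_num)]
  norm_num
  rw [if_pos (show (72 : Int) < q by omega)]
  rw [bs_step _ _ _ _ (by norm_num)]
  norm_num
  rw [if_pos (show (108 : Int) < q by omega)]
  rw [bs_step _ _ _ _ (by norm_num)]
  norm_num
  rw [if_pos (show (126 : Int) < q by omega)]
  rw [bs_done _ _ _ _ (by norm_num)]

theorem bs_at_8 (q : Int) (h1 : 144 < q) (h2 : q ≤ 162) :
    bsLoop q [18, 36, 55, 72, 90, 108, 126, 144, 162, 180, 198, 216, 234, 396, 504, 612] 0 15 = 8 := by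
  rw [bs_step _ _ _ _ (by norm_num)]
  norm_num
  rw [if_pos (show (144 : Int) < q by omega)]
  rw [bs_step _ _ _ _ (by norm_num)]
  norm_num
  rw [if_neg (show ¬ (216 : Int) < q by omega)]
  rw [bs_step _ _ _ _ (by norm_num)]
  norm_num
  rw [if_neg (show ¬ (180 : Int) < q by omega)]
  rw [bs_step _ _ _ _ (by norm_num)]
  norm_num
  rw [if_neg (show ¬ (162 : Int) < q by omega)]
  rw [bs_done _ _ _ _ (by norm_num)]

theorem bs_at_9 (q : Int) (h1 : 162 < q) (h2 : q ≤ 180) :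
    bsLoop q [18, 36, 55, 72, 90, 108, 126, 144, 162, 180, 198, 216, 234, 396, 504, 612] 0 15 = 9 := by
  rw [bs_step _ _ _ _ (by norm_num)]
  norm_num
  rw [if_pos (show (144 : Int) < q by omega)]
  rw [bs_step _ _ _ _ (by norm_num)]
  norm_num
  rw [if_neg (show ¬ (216 : Int) < q by omega)]
  rw [bs_step _ _ _ _ (by norm_num)]
  norm_num
  rw [if_neg (show ¬ (180 : Int) < q by omega)]
  rw [bs_step _ _ _ _ (by norm_num)]
  norm_num
  rw [if_pos (show (162 : Int) < q by omega)]
  rw [bs_done _ _ _ _ (by norm_num)]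

theorem bs_at_10 (q : Int) (h1 : 180 < q) (h2 : q ≤ 198) :
    bsLoop q [18, 36, 55, 72, 90, 108, 126, 144, 162, 180, 198, 216, 234, 396, 504, 612] 0 15 = 10 := by
  rw [bs_step _ _ _ _ (by norm_num)]
  norm_num
  rw [if_pos (show (144 : Int) < q by omega)]
  rw [bs_step _ _ _ _ (by norm_num)]
  norm_num
  rw [if_neg (show ¬ (216 : Int) < q by omega)]
  rw [bs_step _ _ _ _ (by norm_num)]
  norm_num
  rw [if_pos (show (180 : Int) < q by omega)]
  rw [bs_step _ _ _ _ (by norm_num)]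
  norm_num
  rw [if_neg (show ¬ (198 : Int) < q by omega)]
  rw [bs_done _ _ _ _ (by norm_num)]

theorem bs_at_11 (q : Int) (h1 : 198 < q) (h2 : q ≤ 216) :
    bsLoop q [18, 36, 55, 72, 90, 108, 126, 144, 162, 180, 198, 216, 234, 396, 504, 612] 0 15 = 11 := by
  rw [bs_step _ _ _ _ (by norm_num)]
  norm_num
  rw [if_pos (show (144 : Int) < q by omega)]
  rw [bs_step _ _ _ _ (by norm_num)]
  norm_num
  rw [if_neg (show ¬ (216 : Int) < q by omega)]
  rw [bs_step _ _ _ _ (by norm_num)]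
  norm_num
  rw [if_pos (show (180 : Int) < q by omega)]
  rw [bs_step _ _ _ _ (by norm_num)]
  norm_num
  rw [if_pos (show (198 : Int) < q by omega)]
  rw [bs_done _ _ _ _ (by norm_num)]

theorem bs_at_12 (q : Int) (h1 : 216 < q) (h2 : q ≤ 234) :
    bsLoop q [18, 36, 55, 72, 90, 108, 126, 144, 162, 180, 198, 216, 234, 396, 504, 612] 0 15 = 12 := by
  rw [bs_step _ _ _ _ (by norm_num)]
  norm_num
  rw [if_pos (show (144 : Int) < q by omega)]
  rw [bs_step _ _ _ _ (by norm_num)]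
  norm_num
  rw [if_pos (show (216 : Int) < q by omega)]
  rw [bs_step _ _ _ _ (by norm_num)]
  norm_num
  rw [if_neg (show ¬ (396 : Int) < q by omega)]
  rw [bs_step _ _ _ _ (by norm_num)]
  norm_num
  rw [if_neg (show ¬ (234 : Int) < q by omega)]
  rw [bs_done _ _ _ _ (by norm_num)]

theorem bs_at_13 (q : Int) (h1 : 234 < q) (h2 : q ≤ 396) :
    bsLoop q [18, 36, 55, 72, 90, 108, 126, 144, 162, 180, 198, 216, 234, 396, 504, 612] 0 15 = 13 := by
  rw [bs_step _ _ _ _ (by norm_num)]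
  norm_num
  rw [if_pos (show (144 : Int) < q by omega)]
  rw [bs_step _ _ _ _ (by norm_num)]
  norm_num
  rw [if_pos (show (216 : Int) < q by omega)]
  rw [bs_step _ _ _ _ (by norm_num)]
  norm_num
  rw [if_neg (show ¬ (396 : Int) < q by omega)]
  rw [bs_step _ _ _ _ (by norm_num)]
  norm_num
  rw [if_pos (show (234 : Int) < q by omega)]
  rw [bs_done _ _ _ _ (by norm_num)]

theorem bs_at_14 (q : Int) (h1 : 396 < q) (h2 : q ≤ 504) :
    bsLoop q [18, 36, 55, 72, 90, 108, 126, 144, 162, 180, 198, 216, 234, 396, 504, 612] 0 15 = 14 := by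
  rw [bs_step _ _ _ _ (by norm_num)]
  norm_num
  rw [if_pos (show (144 : Int) < q by omega)]
  rw [bs_step _ _ _ _ (by norm_num)]
  norm_num
  rw [if_pos (show (216 : Int) < q by omega)]
  rw [bs_step _ _ _ _ (by norm_num)]
  norm_num
  rw [if_pos (show (396 : Int) < q by omega)]
  rw [bs_step _ _ _ _ (by norm_num)]
  norm_num
  rw [if_neg (show ¬ (504 : Int) < q by omega)]
  rw [bs_done _ _ _ _ (by norm_num)]

theorem bs_at_15 (q : Int) (h : 504 < q) :
    bsLoop q [18, 36, 55, 72, 90, 108, 126, 144, 162, 180, 198, 216, 234, 396, 504, 612] 0 15 = 15 := by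
  rw [bs_step _ _ _ _ (by norm_num)]
  norm_num
  rw [if_pos (show (144 : Int) < q by omega)]
  rw [bs_step _ _ _ _ (by norm_num)]
  norm_num
  rw [if_pos (show (216 : Int) < q by omega)]
  rw [bs_step _ _ _ _ (by norm_num)]
  norm_num
  rw [if_pos (show (396 : Int) < q by omega)]
  rw [bs_step _ _ _ _ (by norm_num)]
  norm_num
  rw [if_pos (show (504 : Int) < q by omega)]
  rw [bs_done _ _ _ _ (by norm_num)]

-- ===== VERDICT (by name: the statement is the Claim_ definition above) =====
set_option maxHeartbeats 1000000 in
theorem get_bracket_spec : Claim_equal_get_bracket := by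
  intro q _
  unfold Spec_get_bracket get_bracket get_bracket_alt
  norm_num
  by_cases h0 : q ≤ 18
  · rw [bs_at_0 q h0]; simp [getBracketLoop, h0]
  by_cases h1 : q ≤ 36
  · rw [bs_at_1 q (by omega) h1]; simp [getBracketLoop, h0, h1]
  by_cases h2 : q ≤ 55
  · rw [bs_at_2 q (by omega) h2]; simp [getBracketLoop, h0, h1, h2]
  by_cases h3 : q ≤ 72
  · rw [bs_at_3 q (by omega) h3]; simp [getBracketLoop, h0, h1, h2, h3]
  by_cases h4 : q ≤ 90
  · rw [bs_at_4 q (by omega) h4]; simp [getBracketLoop, h0, h1, h2, h3, h4]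
  by_cases h5 : q ≤ 108
  · rw [bs_at_5 q (by omega) h5]; simp [getBracketLoop, h0, h1, h2, h3, h4, h5]
  by_cases h6 : q ≤ 126
  · rw [bs_at_6 q (by omega) h6]; simp [getBracketLoop, h0, h1, h2, h3, h4, h5, h6]
  by_cases h7 : q ≤ 144
  · rw [bs_at_7 q (by omega) h7]; simp [getBracketLoop, h0, h1, h2, h3, h4, h5, h6, h7]
  by_cases h8 : q ≤ 162
  · rw [bs_at_8 q (by omega) h8]; simp [getBracketLoop, h0, h1, h2, h3, h4, h5, h6, h7, h8]
  by_cases h9 : q ≤ 180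
  · rw [bs_at_9 q (by omega) h9]; simp [getBracketLoop, h0, h1, h2, h3, h4, h5, h6, h7, h8, h9]
  by_cases h10 : q ≤ 198
  · rw [bs_at_10 q (by omega) h10]; simp [getBracketLoop, h0, h1, h2, h3, h4, h5, h6, h7, h8, h9, h10]
  by_cases h11 : q ≤ 216
  · rw [bs_at_11 q (by omega) h11]; simp [getBracketLoop, h0, h1, h2, h3, h4, h5, h6, h7, h8, h9, h10, h11]
  by_cases h12 : q ≤ 234
  · rw [bs_at_12 q (by omega) h12]; simp [getBracketLoop, h0, h1, h2, h3, h4, h5, h6, h7, h8, h9, h10, h11, h12]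
  by_cases h13 : q ≤ 396
  · rw [bs_at_13 q (by omega) h13]; simp [getBracketLoop, h0, h1, h2, h3, h4, h5, h6, h7, h8, h9, h10, h11, h12, h13]
  by_cases h14 : q ≤ 504
  · rw [bs_at_14 q (by omega) h14]; simp [getBracketLoop, h0, h1, h2, h3, h4, h5, h6, h7, h8, h9, h10, h11, h12, h13, h14]
  · rw [bs_at_15 q (by omega)]
    by_cases h15 : q ≤ 612 <;>
      simp [getBracketLoop, PySem.List.pyGet?, PySem.List.pyIdx?, h0, h1, h2, h3, h4, h5, h6, h7, h8, h9, h10, h11, h12, h13, h14, h15]
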